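-- pv_equiv track=rewrite | github.com/stasptkk-cpu/free_knots | functions.py | get_parity
-- ===== SOURCE A (Python) =====
-- def get_indices(diagram, chord_label):
--     """
--     Находит все позиции (индексы) заданной хорды в диаграмме.
--
--     Каждая хорда в диаграмме свободного узла представлена двумя концами,
--     поэтому для корректной хорды функция всегда возвращает список из двух индексов.
--
--     Параметры:
--     ----------
--     diagram : list of int
--         Хордовая диаграмма, представленная списком меток хорд
--     chord_label : int
--         Метка хорды, для которой ищутся позиции
--
--     Возвращает:
--     -----------
--     list of int
--         Список индексов в диаграмме, где встречается заданная хорда.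
--         Для корректной диаграммы всегда содержит ровно два элемента.
--
--     Примеры:
--     --------
--     >>> get_indices([1, 2, 1, 3, 2, 3], 1)
--     [0, 2]
--     >>> get_indices([1, 2, 1, 3, 2, 3], 2)
--     [1, 4]
--     """
--     return [index for index, chord in enumerate(diagram) if chord == chord_label]
--
-- def get_parity(diagram, chord):
--     """
--     Вычисляет четность хорды в диаграмме свободного узла.
--
--     Параметры:
--     ----------
--     diagram : list of int
--         Хордовая диаграмма
--     chord : int
--         Метка хорды
--
--     Возвращает:
--     -----------
--     int
--         1 если хорда нечетная (пересекает нечетное число других хорд),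
--         0 если хорда четная (пересекает четное число других хорд)
--     """
--     indices = get_indices(diagram, chord)
--     start, end = sorted(indices)
--
--     inner_chords = {}
--
--     for position in range(start + 1, end):
--         current_chord = diagram[position]
--         if current_chord in inner_chords:
--             del inner_chords[current_chord]
--         else:
--             inner_chords[current_chord] = 1
--
--     intersection_count = len(inner_chords)
--     return intersection_count % 2
-- ===== SOURCE B (Python) =====
-- def get_parity(diagram, chord):
--     # Parity of endpoints strictly between the chord's two ends:
--     # every chord inside the interval contributes 2 (cancels) or 1,
--     # so the toggling-dict size parity equals (end - start - 1) % 2.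
--     start, end = sorted(i for i, c in enumerate(diagram) if c == chord)
--     return (end - start - 1) % 2
-- ===== Notes on version B (the rewrite author's own statement) =====
-- stated objective: simpler
-- what changed: Replaces the interval scan with a toggling dict by the closed form (end - start - 1) % 2, since the dict-size parity equals the parity of the number of endpoints strictly inside the interval.
import Mathlib
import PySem

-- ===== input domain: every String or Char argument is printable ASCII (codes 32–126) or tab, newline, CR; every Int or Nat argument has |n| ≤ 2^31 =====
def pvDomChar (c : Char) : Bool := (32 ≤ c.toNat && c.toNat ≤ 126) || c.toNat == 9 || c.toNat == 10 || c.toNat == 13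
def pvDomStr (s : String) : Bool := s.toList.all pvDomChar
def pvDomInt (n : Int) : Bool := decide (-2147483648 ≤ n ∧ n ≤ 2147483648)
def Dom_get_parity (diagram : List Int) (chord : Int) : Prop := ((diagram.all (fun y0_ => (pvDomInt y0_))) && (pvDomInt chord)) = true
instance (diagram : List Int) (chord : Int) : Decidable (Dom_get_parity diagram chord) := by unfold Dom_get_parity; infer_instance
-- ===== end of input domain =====

-- B replaces A's interval scan with a toggling dict by the closed form (end-start-1) % 2 (objective: simpler).

-- ===== PORT A =====
def get_indices (diagram : List Int) (chord_label : Int) : List Int :=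
  ((PySem.List.enumerate diagram 0).filter (fun p => p.2 == chord_label)).map (fun p => p.1)

def get_parity (diagram : List Int) (chord : Int) : Int :=
  let indices := get_indices diagram chord
  match PySem.List.sorted indices (fun x => x) false with
  | [s, e] =>
    let inner : PySem.Dict Int Int :=
      (PySem.List.pyRange (s + 1) e 1).foldl
        (fun d position =>
          -- diagram[position]: always in range when this branch is reached (s, e are indices of diagram)
          let current := PySem.List.pyGetD diagram position 0
          if d.contains current then d.erase current else d.insert current 1)
        PySem.Dict.empty
    PySem.Int.mod (inner.size : Int) 2
  | _ => 0  -- Python raises ValueError (unpacking): excluded by Pre_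

-- ===== PORT B =====
def get_parity_alt (diagram : List Int) (chord : Int) : Int :=
  let l := PySem.List.sorted
      (((PySem.List.enumerate diagram 0).filter (fun p => p.2 == chord)).map (fun p => p.1))
      (fun x => x) false
  -- 'start, end = l' succeeds exactly when l has two elements
  match l[0]?, l[1]?, l[2]? with
  | some s, some e, none => PySem.Int.mod (e - s - 1) 2
  | _, _, _ => 0  -- Python raises ValueError (unpacking): excluded by Pre_

-- ===== PRECONDITION & SPEC =====
-- Pre_ admits exactly the diagrams in which the chord label occurs exactly twice;
-- on all other inputs both A and B raise ValueError at the 2-element unpacking.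
def Pre_get_parity (diagram : List Int) (chord : Int) : Prop := diagram.count chord = 2
instance (diagram : List Int) (chord : Int) : Decidable (Pre_get_parity diagram chord) := by unfold Pre_get_parity; infer_instance
def pvWitness_get_parity : List Int × Int := ([1, 2, 1], 1)
def Spec_get_parity (diagram : List Int) (chord : Int) (out : Int) : Prop := out = get_parity_alt diagram chord
instance (diagram : List Int) (chord : Int) (out : Int) : Decidable (Spec_get_parity diagram chord out) := by unfold Spec_get_parity; infer_instance

-- ===== CLAIM (what is proved, stated in full; the proofs are below) =====
def Claim_equal_get_parity : Prop := ∀ (diagram : List Int) (chord : Int), Dom_get_parity diagram chord → Pre_get_parity diagram chord → Spec_get_parity diagram chord (get_parity diagram chord)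

-- ===== LEMMAS AND PROOFS =====

theorem countP_not_add (l : List (Int × Int)) (p : Int × Int → Bool) :
    l.countP (fun a => !p a) + l.countP p = l.length := by
  induction l with
  | nil => simp
  | cons a t ih => by_cases h : p a = true <;> simp [h] <;> omega

-- one toggle step: size goes down (key present) or up (key absent) by one
theorem toggle_size (d : PySem.Dict Int Int) (x : Int) (hd : d.keys.Nodup) :
    ((if d.contains x then d.erase x else d.insert x 1).size : Int) =
      if d.contains x then (d.size : Int) - 1 else (d.size : Int) + 1 := by
  by_cases hc : d.contains x = true
  · simp only [hc, if_true]
    have hmem : x ∈ d.keys := (PySem.Dict.contains_iff_mem_keys d x).mp hc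
    have hcount : d.keys.count x = 1 := List.count_eq_one_of_mem hd hmem
    have hkeys : d.keys = d.items.map (·.1) := rfl
    have hcp : d.items.countP (fun p => p.1 == x) = 1 := by
      simpa [List.count, List.countP_map, Function.comp] using
        (hkeys ▸ hcount : (d.items.map (·.1)).count x = 1)
    have hle := List.countP_le_length (p := fun p : Int × Int => p.1 == x) (l := d.items)
    have hadd := countP_not_add d.items (fun p => p.1 == x)
    have hsz : (d.erase x).size = d.items.countP (fun p => !(p.1 == x)) := by
      simp only [PySem.Dict.erase, PySem.Dict.size, List.countP_eq_length_filter]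
    simp only [PySem.Dict.size] at *
    omega
  · simp only [hc, if_false, Bool.false_eq_true]
    have h2 : (d.insert x 1).items = d.items ++ [(x, 1)] :=
      PySem.Dict.items_insert_of_not_contains d 1 (by simpa using hc)
    simp [PySem.Dict.size, h2]

theorem toggle_nodup (d : PySem.Dict Int Int) (x : Int) (hd : d.keys.Nodup) :
    (if d.contains x then d.erase x else d.insert x 1).keys.Nodup := by
  by_cases hc : d.contains x = true
  · simp only [hc, if_true]
    have hsub : ((d.erase x).items.map (·.1)).Sublist (d.items.map (·.1)) := by
      simp only [PySem.Dict.erase]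
      exact (List.filter_sublist).map _
    exact List.Nodup.sublist hsub hd
  · simp only [hc, if_false, Bool.false_eq_true]
    exact PySem.Dict.nodup_keys_insert d x 1 hd

-- the toggling fold: final size parity = (initial size + number of steps) parity
theorem fold_toggle_parity (diagram : List Int) (l : List Int) (d : PySem.Dict Int Int)
    (hd : d.keys.Nodup) :
    ((l.foldl (fun d position =>
        let current := PySem.List.pyGetD diagram position 0
        if d.contains current then d.erase current else d.insert current 1) d).size) % 2
      = (d.size + l.length) % 2 := by
  induction l generalizing d with
  | nil => simp
  | cons a t ih =>
    simp only [List.foldl_cons, List.length_cons]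
    set c := PySem.List.pyGetD diagram a 0 with hc
    have hstep := toggle_size d c hd
    have hnd := toggle_nodup d c hd
    rw [ih _ hnd]
    by_cases h : d.contains c = true <;> simp only [h, if_true, if_false, Bool.false_eq_true] at hstep ⊢ <;> omega

-- the two positions of the chord: strictly increasing pair, exactly two of them
theorem idx_facts (diagram : List Int) (chord : Int) (h2 : diagram.count chord = 2) :
    ∃ s e : Int, ((PySem.List.enumerate diagram 0).filter (fun p => p.2 == chord)).map (fun p => p.1) = [s, e] ∧ s < e := by
  set idx := ((PySem.List.enumerate diagram 0).filter (fun p => p.2 == chord)).map (fun p => p.1) with hidx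
  have hpw : idx.Pairwise (· < ·) :=
    ((PySem.List.pairwise_lt_enumerate diagram 0).filter _).map _ (fun a b h => h)
  have hlen : idx.length = 2 := by
    have h1 : ((PySem.List.enumerate diagram 0).map (fun p => p.2)).countP (· == chord)
        = (PySem.List.enumerate diagram 0).countP (fun p => p.2 == chord) := List.countP_map
    rw [PySem.List.map_snd_enumerate] at h1
    have h3 : diagram.count chord = diagram.countP (· == chord) := rfl
    simp only [hidx, List.length_map, ← List.countP_eq_length_filter]
    omega
  match hi : idx, hlen with
  | [s, e], _ =>
    refine ⟨s, e, rfl, ?_⟩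
    exact (List.pairwise_cons.mp hpw).1 e (by simp)

theorem fmod_two (n : Int) : PySem.Int.mod n 2 = n % 2 := by
  simp [PySem.Int.mod, Int.fmod_eq_emod]

-- ===== VERDICT (by name: the statement is the Claim_ definition above) =====
theorem get_parity_spec : Claim_equal_get_parity := by
  intro diagram chord _ hpre
  unfold Spec_get_parity get_parity get_parity_alt get_indices
  obtain ⟨s, e, hidx, hse⟩ := idx_facts diagram chord hpre
  have hple : List.Pairwise (fun a b => a ≤ b) ([s, e] : List Int) := by simp [hse.le]
  rw [hidx]
  simp only [PySem.List.sorted_eq_self_of_pairwise _ _ hple]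
  have hpar := fold_toggle_parity diagram (PySem.List.pyRange (s + 1) e) PySem.Dict.empty
    PySem.Dict.nodup_keys_empty
  rw [PySem.List.length_pyRange_one] at hpar
  simp only [List.getElem?_cons_zero, List.getElem?_cons_succ, List.getElem?_nil, fmod_two]
  simp only [PySem.Dict.size_empty, Nat.zero_add] at hpar
  omega
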